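-- pv_equiv track=rewrite | github.com/xyaocao/CQS-SMART | secondloop/online_schema_linking.py | create_simplified_ddl
-- ===== SOURCE A (Python) =====
-- from typing import Dict, List, Any, Optional, Tuple
--
-- def create_simplified_ddl(tables: List[str], columns: List[str]) -> str:
--     """
--     Create simplified DDL containing only linked tables and columns.
--     Replicates simplified_schema.py::simplified() DDL format.
--
--     Args:
--         tables: List of linked table names
--         columns: List of linked columns in format "table.`column`"
--
--     Returns:
--         Simplified DDL string in format: #\n# table(col1, col2)\n# table2(col1)...
--     """
--     simple_ddl = "#\n# "
--
--     for table in tables: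
--         simple_ddl += table + "("
--         column_list = []
--
--         for column in columns:
--             parts = column.split('.')
--             if len(parts) == 2:
--                 col_table = parts[0].strip()
--                 col_name = parts[1].strip()
--                 if col_table.lower() == table.lower():
--                     column_list.append(col_name)
--
--         if column_list:
--             simple_ddl += ",".join(column_list)
--
--         simple_ddl += ")\n# "
--
--     return simple_ddl.strip()
-- ===== SOURCE B (Python) =====
-- def create_simplified_ddl(tables, columns):
--     """Group columns by lowercased table name once, then emit one line per table."""
--     groups = {}
--     for column in columns:
--         parts = column.split('.')
--         if len(parts) == 2:
--             groups.setdefault(parts[0].strip().lower(), []).append(parts[1].strip())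
--     lines = ["#"]
--     for table in tables:
--         cols = groups.get(table.lower(), [])
--         lines.append("# " + table + "(" + ",".join(cols) + ")")
--     lines.append("#")
--     return "\n".join(lines)
-- ===== Notes on version B (the rewrite author's own statement) =====
-- stated objective: faster
-- what changed: B builds a dict grouping column names by lowercased table name in a single pass over columns, then emits one line per table by lookup and joins the lines, instead of A's rescan of every column for every table and final strip of a concatenated string.
import Mathlib
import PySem

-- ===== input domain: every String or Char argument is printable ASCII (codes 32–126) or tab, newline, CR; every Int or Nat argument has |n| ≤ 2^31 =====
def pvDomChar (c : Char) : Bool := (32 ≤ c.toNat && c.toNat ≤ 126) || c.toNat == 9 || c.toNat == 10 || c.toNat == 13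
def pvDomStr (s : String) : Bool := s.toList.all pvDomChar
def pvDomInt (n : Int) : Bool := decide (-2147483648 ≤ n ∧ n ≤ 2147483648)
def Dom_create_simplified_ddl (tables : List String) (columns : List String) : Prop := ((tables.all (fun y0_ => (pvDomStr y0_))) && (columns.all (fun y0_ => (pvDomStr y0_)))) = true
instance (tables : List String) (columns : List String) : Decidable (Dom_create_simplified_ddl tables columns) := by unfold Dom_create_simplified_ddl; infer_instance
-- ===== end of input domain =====

-- B groups the columns by lowercased table name in ONE pass over `columns` (a dict), then emits one
-- line per table, instead of A's rescan of all columns for every table; same return value everywhere.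

-- ===== PORT A =====
def create_simplified_ddl (tables : List String) (columns : List String) : String :=
  PySem.Str.strip (tables.foldl (fun simple_ddl table =>
    let simple_ddl := simple_ddl ++ table ++ "("
    let column_list := columns.foldl (fun column_list column =>
      match PySem.Str.split? column "." with
      | some [p0, p1] =>
        let col_table := PySem.Str.strip p0
        let col_name := PySem.Str.strip p1
        if PySem.Str.lower col_table = PySem.Str.lower table then column_list ++ [col_name]
        else column_list
      | _ => column_list) ([] : List String)
    let simple_ddl := if column_list ≠ [] then simple_ddl ++ PySem.Str.join "," column_list
                      else simple_ddl
    simple_ddl ++ ")\n# ") "#\n# ")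

-- ===== PORT B =====
def create_simplified_ddl_alt (tables : List String) (columns : List String) : String :=
  let groups : PySem.Dict String (List String) := columns.foldl (fun groups column =>
    let parts := (PySem.Str.split? column ".").getD []
    if parts.length = 2 then
      groups.modify (PySem.Str.lower (PySem.Str.strip (parts.getD 0 ""))) []
        (· ++ [PySem.Str.strip (parts.getD 1 "")])
    else groups) PySem.Dict.empty
  let lines := tables.foldl (fun lines table =>
    lines ++ ["# " ++ table ++ "(" ++ PySem.Str.join "," (groups.getD (PySem.Str.lower table) []) ++ ")"])
    ["#"]
  PySem.Str.join "\n" (lines ++ ["#"])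

-- ===== PRECONDITION & SPEC =====
def Spec_create_simplified_ddl (tables : List String) (columns : List String) (out : String) : Prop := out = create_simplified_ddl_alt tables columns
instance (tables : List String) (columns : List String) (out : String) : Decidable (Spec_create_simplified_ddl tables columns out) := by unfold Spec_create_simplified_ddl; infer_instance

-- ===== CLAIM (what is proved, stated in full; the proofs are below) =====
def Claim_equal_create_simplified_ddl : Prop := ∀ (tables : List String) (columns : List String), Dom_create_simplified_ddl tables columns → Spec_create_simplified_ddl tables columns (create_simplified_ddl tables columns)

-- ===== LEMMAS AND PROOFS =====

-- the column name selected (if any) by a column entry, for the lowercased table key k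
def pvSel (k : String) (column : String) : Option String :=
  match PySem.Str.split? column "." with
  | some [p0, p1] =>
    if PySem.Str.lower (PySem.Str.strip p0) = k then some (PySem.Str.strip p1) else none
  | _ => none

-- the column list both programs collect for a table whose lowercased name is k
def pvCl (columns : List String) (k : String) : List String := columns.filterMap (pvSel k)

-- the character block "table(col1,col2)" emitted for one table
def pvCore (columns : List String) (t : String) : List Char :=
  t.toList ++ ['('] ++ (PySem.Str.join "," (pvCl columns (PySem.Str.lower t))).toList ++ [')']

theorem pv_innerA (columns : List String) (table : String) : ∀ (acc : List String),
    columns.foldl (fun column_list column =>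
      match PySem.Str.split? column "." with
      | some [p0, p1] =>
        let col_table := PySem.Str.strip p0
        let col_name := PySem.Str.strip p1
        if PySem.Str.lower col_table = PySem.Str.lower table then column_list ++ [col_name]
        else column_list
      | _ => column_list) acc
    = acc ++ pvCl columns (PySem.Str.lower table) := by
  induction columns with
  | nil => intro acc; simp [pvCl]
  | cons c cs ih =>
    intro acc
    rw [List.foldl_cons]
    have hcl : pvCl (c :: cs) (PySem.Str.lower table)
        = ((pvSel (PySem.Str.lower table) c).toList) ++ pvCl cs (PySem.Str.lower table) := by
      simp [pvCl, List.filterMap_cons]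
      rcases pvSel (PySem.Str.lower table) c <;> simp
    rw [hcl, ih]
    rcases h : PySem.Str.split? c "." with _ | ⟨_ | ⟨p0, _ | ⟨p1, _ | _⟩⟩⟩ <;>
      simp only [pvSel, h, Option.toList] <;> try simp
    by_cases hc : PySem.Str.lower (PySem.Str.strip p0) = PySem.Str.lower table <;>
      simp [hc, List.append_assoc]

theorem pv_groupsB (columns : List String) : ∀ (g : PySem.Dict String (List String)) (k : String),
    (columns.foldl (fun groups column =>
      let parts := (PySem.Str.split? column ".").getD []
      if parts.length = 2 then
        groups.modify (PySem.Str.lower (PySem.Str.strip (parts.getD 0 ""))) []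
          (· ++ [PySem.Str.strip (parts.getD 1 "")])
      else groups) g).getD k []
    = g.getD k [] ++ pvCl columns k := by
  induction columns with
  | nil => intro g k; simp [pvCl]
  | cons c cs ih =>
    intro g k
    rw [List.foldl_cons]
    dsimp only
    rw [ih]
    have hcl : pvCl (c :: cs) k = ((pvSel k c).toList) ++ pvCl cs k := by
      simp [pvCl, List.filterMap_cons]
      rcases pvSel k c <;> simp
    rw [hcl, ← List.append_assoc]
    congr 1
    rcases h : PySem.Str.split? c "." with _ | ⟨_ | ⟨p0, _ | ⟨p1, _ | _⟩⟩⟩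
    · simp [pvSel, h]
    · simp [pvSel, h]
    · simp [pvSel, h]
    · have hlen : (([p0, p1] : List String)).length = 2 := rfl
      simp only [Option.getD_some]
      rw [if_pos hlen, PySem.Dict.getD_modify]
      simp only [List.getD_cons_zero, List.getD_cons_succ]
      by_cases hc : PySem.Str.lower (PySem.Str.strip p0) = k
      · simp [pvSel, h, hc]
      · simp [pvSel, h, hc, Ne.symm hc]
    · simp [pvSel, h]

theorem pv_foldA (columns : List String) (tables : List String) : ∀ (init : String),
    (tables.foldl (fun simple_ddl table =>
      let simple_ddl := simple_ddl ++ table ++ "("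
      let column_list := columns.foldl (fun column_list column =>
        match PySem.Str.split? column "." with
        | some [p0, p1] =>
          let col_table := PySem.Str.strip p0
          let col_name := PySem.Str.strip p1
          if PySem.Str.lower col_table = PySem.Str.lower table then column_list ++ [col_name]
          else column_list
        | _ => column_list) ([] : List String)
      let simple_ddl := if column_list ≠ [] then simple_ddl ++ PySem.Str.join "," column_list
                        else simple_ddl
      simple_ddl ++ ")\n# ") init).toList
    = init.toList ++ tables.flatMap (fun t => pvCore columns t ++ ['\n', '#', ' ']) := by
  induction tables with
  | nil => intro init; simp
  | cons t ts ih =>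
    intro init
    rw [List.foldl_cons, ih, List.flatMap_cons]
    dsimp only
    rw [pv_innerA]
    simp only [List.nil_append]
    by_cases hc : pvCl columns (PySem.Str.lower t) = []
    · simp [hc, pvCore, List.append_assoc, PySem.Str.join, PySem.Chars.join, List.intercalate]
    · simp [hc, pvCore, List.append_assoc]

-- rotate the separator from after each block to before it
theorem pv_rotate {α : Type} (f : α → List Char) (sep : List Char) : ∀ (l : List α),
    sep ++ l.flatMap (fun t => f t ++ sep) = l.flatMap (fun t => sep ++ f t) ++ sep := by
  intro l
  induction l with
  | nil => simp
  | cons a as ih =>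
    simp only [List.flatMap_cons, List.append_assoc] at *
    rw [← List.append_assoc, ih]
    simp [List.append_assoc]

theorem pv_strip (zs : List Char) :
    PySem.Chars.strip ('#' :: (zs ++ ['\n', '#', ' '])) = '#' :: (zs ++ ['\n', '#']) := by
  simp [PySem.Chars.strip, PySem.Chars.lstrip, PySem.Chars.rstrip, List.dropWhile,
    PySem.Chars.isspace, List.reverse_append]

theorem pv_join_cons (sep : List Char) : ∀ (xs : List (List Char)) (x : List Char),
    PySem.Chars.join sep (x :: xs) = x ++ xs.flatMap (fun y => sep ++ y) := by
  intro xs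
  induction xs with
  | nil => intro x; simp [PySem.Chars.join, List.intercalate]
  | cons q rest ih =>
    intro x
    rw [PySem.Chars.join_cons_cons, ih, List.flatMap_cons]
    simp [List.append_assoc]

theorem pv_A_toList (tables columns : List String) :
    (create_simplified_ddl tables columns).toList
    = '#' :: (tables.flatMap (fun t => ['\n', '#', ' '] ++ pvCore columns t) ++ ['\n', '#']) := by
  simp only [create_simplified_ddl]
  rw [PySem.Str.toList_strip, pv_foldA]
  have h0 : "#\n# ".toList = '#' :: ['\n', '#', ' '] := by decide
  rw [h0, List.cons_append, pv_rotate]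
  exact pv_strip _

theorem pv_B_toList (tables columns : List String) :
    (create_simplified_ddl_alt tables columns).toList
    = '#' :: (tables.flatMap (fun t => ['\n', '#', ' '] ++ pvCore columns t) ++ ['\n', '#']) := by
  simp only [create_simplified_ddl_alt]
  rw [PySem.List.foldl_append_singleton_eq_map, PySem.Str.toList_join]
  simp only [List.cons_append, List.map_append, List.map_cons, List.map_map, List.map_nil]
  rw [pv_join_cons]
  simp only [List.flatMap_append, List.flatMap_cons, List.flatMap_nil, List.flatMap_map,
    Function.comp]
  have hline : ∀ t : String,
      "\n".toList ++ ("# " ++ t ++ "(" ++ PySem.Str.join ","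
          ((columns.foldl (fun groups column =>
            let parts := (PySem.Str.split? column ".").getD []
            if parts.length = 2 then
              groups.modify (PySem.Str.lower (PySem.Str.strip (parts.getD 0 ""))) []
                (· ++ [PySem.Str.strip (parts.getD 1 "")])
            else groups) PySem.Dict.empty).getD (PySem.Str.lower t) []) ++ ")").toList
      = ['\n', '#', ' '] ++ pvCore columns t := by
    intro t
    rw [pv_groupsB]
    simp [pvCore, List.append_assoc, PySem.Dict.getD, PySem.Dict.empty, PySem.Dict.get?]
  simp only [hline]
  simp

-- ===== VERDICT (by name: the statement is the Claim_ definition above) =====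
theorem create_simplified_ddl_spec : Claim_equal_create_simplified_ddl := by
  intro tables columns _
  show create_simplified_ddl tables columns = create_simplified_ddl_alt tables columns
  apply String.toList_inj.mp
  rw [pv_A_toList, pv_B_toList]
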